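-- pv_equiv track=rewrite | github.com/matteoprata/DRONET-for-Patrolling | src/patrolling/SOTA/util/rndgraph.py | incremental_samples_depots
-- ===== SOURCE A (Python) =====
-- def incremental_samples_depots(ndepots, space=20, x=None, y=None):
--     """ sample increamental points from the center of
--         non selected axis. The input x and y must be in XOR, only one
--         at times can be different from None. The axis that is None
--         will be used for sampling points from its center,
--         from 0 to space*ndepots/2.
--
--     es: if x is None:
--         the method samples (0,y), (20,y), (-20,y), (40,y), etc...
--     es: if y is None:
--         the method samples (x, 0), (x, 20), (x, -20), (x, 40), etc...
--     """
--     assert ((x is None and y is not None)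
--             or (x is not None and y is None))
--
--     depots = set()
--     sign = 1
--     spacing = 0
--     for i in range(0, ndepots):
--         if x is None:
--             depots.add((sign * spacing, y))
--         else:
--             depots.add((x, sign * spacing))
--         sign *= -1
--         if i % 2 == 0:
--             spacing += space
--
--     return depots
-- ===== SOURCE B (Python) =====
-- def incremental_samples_depots(ndepots, space=20, x=None, y=None):
--     """Closed-form rewrite: the i-th sampled offset is ((-1)**i) * ((i+1)//2) * space,
--     so no sign/spacing accumulator state is needed."""
--     assert ((x is None and y is not None)
--             or (x is not None and y is None))
--     if x is None:
--         return {(((-1) ** i) * ((i + 1) // 2) * space, y) for i in range(ndepots)}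
--     return {(x, ((-1) ** i) * ((i + 1) // 2) * space) for i in range(ndepots)}
-- ===== Notes on version B (the rewrite author's own statement) =====
-- stated objective: simpler
-- what changed: The stateful loop carrying a sign flip and a conditionally-incremented spacing accumulator is replaced by a per-index closed form ((-1)**i)*((i+1)//2)*space in a set comprehension, so no loop state survives between iterations.
import Mathlib
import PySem

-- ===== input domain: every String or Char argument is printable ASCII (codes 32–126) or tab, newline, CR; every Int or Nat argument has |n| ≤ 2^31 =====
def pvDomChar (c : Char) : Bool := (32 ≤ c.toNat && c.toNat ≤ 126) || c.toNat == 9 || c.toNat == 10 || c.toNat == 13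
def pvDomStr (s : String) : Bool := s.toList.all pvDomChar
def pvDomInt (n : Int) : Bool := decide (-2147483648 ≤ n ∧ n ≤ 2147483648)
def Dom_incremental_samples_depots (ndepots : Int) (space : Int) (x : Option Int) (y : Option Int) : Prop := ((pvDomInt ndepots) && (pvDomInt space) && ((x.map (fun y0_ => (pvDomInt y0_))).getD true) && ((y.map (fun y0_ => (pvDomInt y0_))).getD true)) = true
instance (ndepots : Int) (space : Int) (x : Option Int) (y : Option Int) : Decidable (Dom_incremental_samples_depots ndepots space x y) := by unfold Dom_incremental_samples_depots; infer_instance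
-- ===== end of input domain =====

-- B replaces A's stateful loop (sign flip + conditional spacing accumulator) by the
-- per-index closed form ((-1)**i) * ((i+1)//2) * space in a set comprehension (simpler).


-- ===== PORT A =====
-- the assert is Pre_ below; loop state is (depots, sign, spacing); 'y.getD 0' only
-- totalises the tuple '(sign*spacing, y)' — under Pre_ the x-is-none branch has y = some _.
def incremental_samples_depots (ndepots : Int) (space : Int) (x : Option Int) (y : Option Int) : List (Int × Int) :=
  let st :=
    (PySem.List.pyRange 0 ndepots 1).foldl
      (fun (st : PySem.Set (Int × Int) × Int × Int) i =>
        ((match x with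
          | none => PySem.Set.add st.1 (st.2.1 * st.2.2, y.getD 0)
          | some xv => PySem.Set.add st.1 (xv, st.2.1 * st.2.2)),
         st.2.1 * -1,
         if i % 2 == 0 then st.2.2 + space else st.2.2))
      (PySem.Set.empty, 1, 0)
  st.1

-- ===== PORT B =====
-- i comes from range(ndepots) so i ≥ 0; '(-1) ** i' is (-1)^i.toNat
def incremental_samples_depots_alt (ndepots : Int) (space : Int) (x : Option Int) (y : Option Int) : List (Int × Int) :=
  match x with
  | none =>
      PySem.Set.ofList ((PySem.List.pyRange 0 ndepots 1).map
        (fun i => ((-1 : Int) ^ i.toNat * PySem.Int.floordiv (i + 1) 2 * space, y.getD 0)))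
  | some xv =>
      PySem.Set.ofList ((PySem.List.pyRange 0 ndepots 1).map
        (fun i => (xv, (-1 : Int) ^ i.toNat * PySem.Int.floordiv (i + 1) 2 * space)))

-- ===== PRECONDITION & SPEC =====
-- exactly the assert: exactly one of x, y is None (otherwise A raises AssertionError)
def Pre_incremental_samples_depots (ndepots : Int) (space : Int) (x : Option Int) (y : Option Int) : Prop :=
  (x = none ∧ y ≠ none) ∨ (x ≠ none ∧ y = none)
instance (ndepots : Int) (space : Int) (x : Option Int) (y : Option Int) : Decidable (Pre_incremental_samples_depots ndepots space x y) := by unfold Pre_incremental_samples_depots; infer_instance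

def pvWitness_incremental_samples_depots : Int × Int × Option Int × Option Int := (4, 20, none, some 7)

def Spec_incremental_samples_depots (ndepots : Int) (space : Int) (x : Option Int) (y : Option Int) (out : List (Int × Int)) : Prop := out = incremental_samples_depots_alt ndepots space x y
instance (ndepots : Int) (space : Int) (x : Option Int) (y : Option Int) (out : List (Int × Int)) : Decidable (Spec_incremental_samples_depots ndepots space x y out) := by unfold Spec_incremental_samples_depots; infer_instance

-- ===== CLAIM (what is proved, stated in full; the proofs are below) =====
def Claim_equal_incremental_samples_depots : Prop := ∀ (ndepots : Int) (space : Int) (x : Option Int) (y : Option Int), Dom_incremental_samples_depots ndepots space x y → Pre_incremental_samples_depots ndepots space x y → Spec_incremental_samples_depots ndepots space x y (incremental_samples_depots ndepots space x y)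

-- ===== LEMMAS AND PROOFS =====

-- Loop invariant for A's fold, for either axis via the embedding `emb` of the offset
-- into the output pair: after N steps the state is
-- (set of the first N closed-form points, (-1)^N, ((N+1)/2)*space).
theorem pv_loop_inv (space : Int) (emb : Int → Int × Int) (N : Nat) :
    (((List.range N).map (fun (k : Nat) => (k : Int))).foldl
      (fun (st : PySem.Set (Int × Int) × Int × Int) i =>
        (PySem.Set.add st.1 (emb (st.2.1 * st.2.2)),
         st.2.1 * -1,
         if i % 2 == 0 then st.2.2 + space else st.2.2))
      (PySem.Set.empty, 1, 0))
    = (PySem.Set.ofList ((List.range N).map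
         (fun k => emb ((-1 : Int) ^ k * (((k + 1) / 2 : Nat) : Int) * space))),
       (-1 : Int) ^ N, (((N + 1) / 2 : Nat) : Int) * space) := by
  induction N with
  | zero => simp [PySem.Set.ofList, PySem.Set.empty]
  | succ n ih =>
      simp only [List.range_succ, List.map_append, List.foldl_append]
      rw [ih]
      simp only [List.map_cons, List.map_nil, List.foldl_cons, List.foldl_nil,
        PySem.Set.ofList_append_singleton]
      refine Prod.ext ?_ (Prod.ext ?_ ?_) <;> simp only
      · congr 2
        ring
      · ring
      · have hmod : ((n : Int) % 2 == 0) = decide (n % 2 = 0) := by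
          have hc : (n : Int) % 2 = ((n % 2 : Nat) : Int) := by
            exact_mod_cast (Int.natCast_mod n 2).symm
          rw [hc]
          by_cases h : n % 2 = 0 <;> simp [h] <;> omega
        rw [hmod]
        by_cases h : n % 2 = 0
        · have h2 : ((n + 1 + 1) / 2 : Nat) = (n + 1) / 2 + 1 := by omega
          simp [h, h2]
          ring
        · have h2 : ((n + 1 + 1) / 2 : Nat) = (n + 1) / 2 := by omega
          simp [h, h2]

theorem incremental_samples_depots_spec : Claim_equal_incremental_samples_depots := by
  intro ndepots space x y _ hpre
  unfold Spec_incremental_samples_depots incremental_samples_depots incremental_samples_depots_alt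
  have hr : PySem.List.pyRange 0 ndepots 1
      = (List.range (ndepots - 0).toNat).map (fun (k : Nat) => (k : Int)) := by
    rw [PySem.List.pyRange_one]
    simp only [zero_add]
  have hoff : ∀ k : Nat,
      (-1 : Int) ^ ((k : Int)).toNat * PySem.Int.floordiv ((k : Int) + 1) 2 * space
        = (-1 : Int) ^ k * (((k + 1) / 2 : Nat) : Int) * space := by
    intro k
    have : PySem.Int.floordiv ((k : Int) + 1) 2 = (((k + 1) / 2 : Nat) : Int) := by
      have := PySem.Int.floordiv_natCast (k + 1) 2
      simpa using this
    rw [this]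
    simp
  rcases hpre with ⟨hx, _⟩ | ⟨_, hy⟩
  · subst hx
    simp only [hr]
    rw [pv_loop_inv space (fun o => (o, y.getD 0)) (ndepots - 0).toNat]
    simp only [List.map_map]
    congr 1
  · cases x with
    | none => simp at *
    | some xv =>
      simp only [hr]
      rw [pv_loop_inv space (fun o => (xv, o)) (ndepots - 0).toNat]
      simp only [List.map_map]
      congr 1
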